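-- pv_equiv track=rewrite | github.com/wFeeL/store_ies_data | main.py | forecast_required_series
-- ===== SOURCE A (Python) =====
-- OTF ={'hospital':'hospital','factory':'factory','office':'office','houseA':'houseA','houseB':'houseB'}
--
-- def forecast_required_series (object_rows =None ):
-- 	required =['sun','wind']
-- 	if not object_rows :
-- 		return required
-- 	for row in object_rows :
-- 		fc_name =OTF .get (row .get ('type'))
-- 		if fc_name and fc_name not in required :
-- 			required .append (fc_name )
-- 	return required
-- ===== SOURCE B (Python) =====
-- OTF = {'hospital': 'hospital', 'factory': 'factory', 'office': 'office',
--        'houseA': 'houseA', 'houseB': 'houseB'}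
--
--
-- def forecast_required_series(object_rows=None):
--     # Inverted traversal: instead of scanning rows and deduplicating with a
--     # membership test, scan the fixed OTF table, find which series occur among
--     # the row types, and order them by the position of their first occurrence.
--     types = [row.get('type') for row in (object_rows or [])]
--     present = [name for name in OTF if name in types]
--     present.sort(key=types.index)
--     return ['sun', 'wind'] + present
-- ===== Notes on version B (the rewrite author's own statement) =====
-- stated objective: alternative
-- what changed: B inverts the traversal: instead of A's single scan over the rows that deduplicates with an inline 'not in required' test, B iterates over the fixed OTF table to find which series names occur among the row types, then sorts those names by the index of their first occurrence in the type list.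
import Mathlib
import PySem

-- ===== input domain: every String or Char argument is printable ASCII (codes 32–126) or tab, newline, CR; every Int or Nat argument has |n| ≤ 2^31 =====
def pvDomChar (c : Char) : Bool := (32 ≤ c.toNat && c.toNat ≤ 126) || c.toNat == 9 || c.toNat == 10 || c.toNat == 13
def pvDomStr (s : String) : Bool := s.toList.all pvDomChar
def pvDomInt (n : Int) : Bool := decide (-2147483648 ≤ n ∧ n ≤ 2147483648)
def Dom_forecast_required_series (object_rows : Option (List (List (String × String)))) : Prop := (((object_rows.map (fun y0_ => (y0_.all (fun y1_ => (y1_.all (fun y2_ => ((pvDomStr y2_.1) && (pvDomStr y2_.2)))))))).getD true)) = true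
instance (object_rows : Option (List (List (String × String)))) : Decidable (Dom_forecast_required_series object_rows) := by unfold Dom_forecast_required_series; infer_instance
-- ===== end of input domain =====

-- B inverts the traversal (scan the fixed OTF table, then order the found series by first occurrence among the row types) instead of A's row scan with an inline membership dedup; alternative algorithm, not claimed faster.

-- ===== PORT A =====
-- module constant OTF
def pvOTF : List (String × String) :=
  [("hospital","hospital"),("factory","factory"),("office","office"),("houseA","houseA"),("houseB","houseB")]

-- row.get('type'): first-match lookup in the row association list
def pvRowGetType (row : List (String × String)) : Option String :=
  (row.find? (fun p => p.1 == "type")).map Prod.snd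

-- OTF.get(k): OTF.get(None) is None, otherwise first-match lookup in OTF
def pvOTFGet (t? : Option String) : Option String :=
  match t? with
  | none => none
  | some t => (pvOTF.find? (fun p => p.1 == t)).map Prod.snd

-- loop body of A: 'if fc_name and fc_name not in required: required.append(fc_name)'
def pvStepA (required : List String) (row : List (String × String)) : List String :=
  match pvOTFGet (pvRowGetType row) with
  | none => required
  | some s => if s ≠ "" ∧ s ∉ required then required ++ [s] else required

def forecast_required_series (object_rows : Option (List (List (String × String)))) : List String :=
  let required := ["sun", "wind"]
  match object_rows with
  | none => required                                  -- 'if not object_rows'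
  | some rows => if rows = [] then required else rows.foldl pvStepA required

-- ===== PORT B =====
def forecast_required_series_alt (object_rows : Option (List (List (String × String)))) : List String :=
  let types := (object_rows.getD []).map pvRowGetType                       -- [row.get('type') for row in (object_rows or [])]
  let present := (pvOTF.map Prod.fst).filter (fun name => types.contains (some name))   -- [name for name in OTF if name in types]
  -- present.sort(key=types.index); types.index never raises here since every name in present occurs in types
  let sortedP := PySem.List.sorted present (fun name => (PySem.List.index? types (some name)).getD 0) false
  ["sun", "wind"] ++ sortedP

-- ===== PRECONDITION & SPEC =====
def Spec_forecast_required_series (object_rows : Option (List (List (String × String)))) (out : List String) : Prop := out = forecast_required_series_alt object_rows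
instance (object_rows : Option (List (List (String × String)))) (out : List String) : Decidable (Spec_forecast_required_series object_rows out) := by unfold Spec_forecast_required_series; infer_instance

-- ===== CLAIM (what is proved, stated in full; the proofs are below) =====
def Claim_equal_forecast_required_series : Prop := ∀ (object_rows : Option (List (List (String × String)))), Dom_forecast_required_series object_rows → Spec_forecast_required_series object_rows (forecast_required_series object_rows)

-- ===== LEMMAS AND PROOFS =====

-- the keys of OTF
def pvKeysL : List String := ["hospital","factory","office","houseA","houseB"]

theorem pvKeys_eq : pvOTF.map Prod.fst = pvKeysL := by decide

-- normalised candidate map: OTF maps every key to itself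
def pvCandN (t? : Option String) : Option String :=
  t?.bind (fun t => if t ∈ pvKeysL then some t else none)

theorem pvOTFGet_eq (t? : Option String) : pvOTFGet t? = pvCandN t? := by
  cases t? with
  | none => rfl
  | some t =>
    unfold pvOTFGet pvCandN pvOTF
    by_cases h1 : t = "hospital"; · subst h1; decide
    by_cases h2 : t = "factory"; · subst h2; decide
    by_cases h3 : t = "office"; · subst h3; decide
    by_cases h4 : t = "houseA"; · subst h4; decide
    by_cases h5 : t = "houseB"; · subst h5; decide
    have e1 : ("hospital" == t) = false := beq_eq_false_iff_ne.mpr (Ne.symm h1)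
    have e2 : ("factory" == t) = false := beq_eq_false_iff_ne.mpr (Ne.symm h2)
    have e3 : ("office" == t) = false := beq_eq_false_iff_ne.mpr (Ne.symm h3)
    have e4 : ("houseA" == t) = false := beq_eq_false_iff_ne.mpr (Ne.symm h4)
    have e5 : ("houseB" == t) = false := beq_eq_false_iff_ne.mpr (Ne.symm h5)
    simp [List.find?, e1, e2, e3, e4, e5, pvKeysL, h1, h2, h3, h4, h5]

theorem pvCandN_some {t? : Option String} {y : String} (h : pvCandN t? = some y) :
    t? = some y ∧ y ∈ pvKeysL := by
  cases t? with
  | none => simp [pvCandN] at h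
  | some t =>
    by_cases hm : t ∈ pvKeysL
    · simp [pvCandN, hm] at h
      exact ⟨by rw [h], h ▸ hm⟩
    · simp [pvCandN, hm] at h

theorem pvCandN_none {t : String} (h : pvCandN (some t) = none) : t ∉ pvKeysL := by
  by_cases hm : t ∈ pvKeysL
  · simp [pvCandN, hm] at h
  · exact hm

theorem pvKeys_ne_empty {x : String} (h : x ∈ pvKeysL) : x ≠ "" := by
  fin_cases h <;> decide

theorem pvKeys_not_base {x : String} (h : x ∈ pvKeysL) : x ∉ (["sun","wind"] : List String) := by
  fin_cases h <;> decide

-- the deduplicating remainder A's loop produces past its accumulator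
def pvDedupRun (seen : List String) (ts : List (Option String)) : List String :=
  match ts with
  | [] => []
  | t? :: ts' =>
    match pvCandN t? with
    | none => pvDedupRun seen ts'
    | some x => if x ∈ seen then pvDedupRun seen ts' else x :: pvDedupRun (seen ++ [x]) ts'

theorem pvFoldA_eq (rows : List (List (String × String))) :
    ∀ acc : List String, rows.foldl pvStepA acc = acc ++ pvDedupRun acc (rows.map pvRowGetType) := by
  induction rows with
  | nil => intro acc; simp [pvDedupRun]
  | cons r rs ih =>
    intro acc
    simp only [List.foldl_cons, List.map_cons, pvDedupRun]
    rw [ih]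
    unfold pvStepA
    rw [pvOTFGet_eq]
    cases h : pvCandN (pvRowGetType r) with
    | none => rfl
    | some x =>
      have hk := (pvCandN_some h).2
      by_cases hm : x ∈ acc
      · simp [hm]
      · simp [hm, pvKeys_ne_empty hk, List.append_assoc]

theorem pvMem_run (ts : List (Option String)) :
    ∀ (seen : List String) (x : String),
      x ∈ pvDedupRun seen ts ↔ some x ∈ ts ∧ x ∈ pvKeysL ∧ x ∉ seen := by
  induction ts with
  | nil => intro seen x; simp [pvDedupRun]
  | cons t? ts' ih =>
    intro seen x
    simp only [pvDedupRun]
    cases h : pvCandN t? with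
    | none =>
      rw [ih]
      constructor
      · rintro ⟨h1, h2, h3⟩; exact ⟨List.mem_cons_of_mem _ h1, h2, h3⟩
      · rintro ⟨h1, h2, h3⟩
        rcases List.mem_cons.mp h1 with h1 | h1
        · rw [← h1] at h
          exact absurd h2 (pvCandN_none h)
        · exact ⟨h1, h2, h3⟩
    | some y =>
      obtain ⟨hty, hyk⟩ := pvCandN_some h
      subst hty
      by_cases hm : y ∈ seen
      · simp only [if_pos hm]
        rw [ih]
        constructor
        · rintro ⟨h1, h2, h3⟩; exact ⟨List.mem_cons_of_mem _ h1, h2, h3⟩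
        · rintro ⟨h1, h2, h3⟩
          rcases List.mem_cons.mp h1 with h1 | h1
          · have hx := Option.some_inj.mp h1
            subst hx
            exact absurd hm h3
          · exact ⟨h1, h2, h3⟩
      · simp only [if_neg hm, List.mem_cons]
        rw [ih]
        constructor
        · rintro (rfl | ⟨h1, h2, h3⟩)
          · exact ⟨Or.inl rfl, hyk, hm⟩
          · refine ⟨Or.inr h1, h2, fun hx => h3 (List.mem_append_left _ hx)⟩
        · rintro ⟨h1, h2, h3⟩
          by_cases hxy : x = y
          · exact Or.inl hxy
          · rcases h1 with h1 | h1
            · exact absurd (Option.some_inj.mp h1) hxy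
            · refine Or.inr ⟨h1, h2, fun hx => ?_⟩
              rcases List.mem_append.mp hx with hx | hx
              · exact h3 hx
              · exact hxy (List.mem_singleton.mp hx)

theorem pvPairwise_run (ts : List (Option String)) :
    ∀ seen : List String,
      (pvDedupRun seen ts).Pairwise (fun a b => ts.idxOf (some a) < ts.idxOf (some b)) := by
  induction ts with
  | nil => intro seen; simp [pvDedupRun]
  | cons t? ts' ih =>
    intro seen
    simp only [pvDedupRun]
    have shift : ∀ (l : List String) (seen' : List String),
        (∀ a ∈ l, t? ≠ some a) →
        l.Pairwise (fun a b => ts'.idxOf (some a) < ts'.idxOf (some b)) →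
        l.Pairwise (fun a b => (t? :: ts').idxOf (some a) < (t? :: ts').idxOf (some b)) := by
      intro l seen' hne hp
      refine List.Pairwise.imp_of_mem ?_ hp
      intro a b ha hb hab
      rw [List.idxOf_cons_ne _ (hne a ha), List.idxOf_cons_ne _ (hne b hb)]
      omega
    cases h : pvCandN t? with
    | none =>
      refine shift _ seen (fun a ha hta => ?_) (ih seen)
      have := ((pvMem_run ts' seen a).mp ha).2.1
      exact absurd this (pvCandN_none (hta ▸ h))
    | some y =>
      obtain ⟨hty, hyk⟩ := pvCandN_some h
      subst hty
      by_cases hm : y ∈ seen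
      · simp only [if_pos hm]
        refine shift _ seen (fun a ha hta => ?_) (ih seen)
        have := ((pvMem_run ts' seen a).mp ha).2.2
        exact this (Option.some_inj.mp hta ▸ hm)
      · simp only [if_neg hm]
        have hrest : ∀ a ∈ pvDedupRun (seen ++ [y]) ts', a ≠ y := by
          intro a ha hay
          have := ((pvMem_run ts' (seen ++ [y]) a).mp ha).2.2
          exact this (List.mem_append_right _ (hay ▸ List.mem_singleton_self y))
        have hne' : ∀ a ∈ pvDedupRun (seen ++ [y]) ts', (some y : Option String) ≠ some a := by
          intro a ha h'
          exact hrest a ha (Option.some_inj.mp h').symm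
        refine List.Pairwise.cons ?_ (shift _ (seen ++ [y]) hne' (ih (seen ++ [y])))
        intro b hb
        rw [List.idxOf_cons_self, List.idxOf_cons_ne _ (hne' b hb)]
        omega

theorem pvKeyf_eq (ts : List (Option String)) (x : String) (hx : some x ∈ ts) :
    (PySem.List.index? ts (some x)).getD 0 = ts.idxOf (some x) := by
  induction ts with
  | nil => cases hx
  | cons t ts' ih =>
    by_cases ht : t = some x
    · subst ht
      rw [PySem.List.index?_cons_self, List.idxOf_cons_self]
      rfl
    · have hx' : some x ∈ ts' := by
        rcases List.mem_cons.mp hx with h | h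
        · exact absurd h.symm ht
        · exact h
      rw [PySem.List.index?_cons_of_ne ts' ht, List.idxOf_cons_ne _ ht]
      obtain ⟨k, hk⟩ := Option.isSome_iff_exists.mp ((PySem.List.index?_isSome_iff ts' (some x)).mpr hx')
      rw [hk]
      have := ih hx'
      rw [hk] at this
      simp only [Option.map_some, Option.getD_some] at this ⊢
      omega

theorem pvRun_eq_sorted (ts : List (Option String)) :
    PySem.List.sorted ((pvOTF.map Prod.fst).filter (fun name => ts.contains (some name)))
      (fun name => (PySem.List.index? ts (some name)).getD 0) false
      = pvDedupRun ["sun","wind"] ts := by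
  have hmem : ∀ x, x ∈ pvDedupRun ["sun","wind"] ts ↔
      x ∈ (pvOTF.map Prod.fst).filter (fun name => ts.contains (some name)) := by
    intro x
    rw [pvMem_run, pvKeys_eq, List.mem_filter]
    constructor
    · rintro ⟨h1, h2, _⟩
      exact ⟨h2, by simpa using h1⟩
    · rintro ⟨h1, h2⟩
      exact ⟨by simpa using h2, h1, pvKeys_not_base h1⟩
  have hpw : (pvDedupRun ["sun","wind"] ts).Pairwise
      (fun a b => (PySem.List.index? ts (some a)).getD 0 < (PySem.List.index? ts (some b)).getD 0) := by
    refine List.Pairwise.imp_of_mem ?_ (pvPairwise_run ts ["sun","wind"])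
    intro a b ha hb hab
    rw [pvKeyf_eq ts a ((pvMem_run ts _ a).mp ha).1, pvKeyf_eq ts b ((pvMem_run ts _ b).mp hb).1]
    exact hab
  have hnd : (pvDedupRun ["sun","wind"] ts).Nodup := by
    refine List.Pairwise.imp ?_ (pvPairwise_run ts ["sun","wind"])
    intro a b hab heq
    subst heq
    omega
  have hndf : ((pvOTF.map Prod.fst).filter (fun name => ts.contains (some name))).Nodup :=
    List.Nodup.filter _ (by decide)
  have hperm : (pvDedupRun ["sun","wind"] ts).Perm
      ((pvOTF.map Prod.fst).filter (fun name => ts.contains (some name))) :=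
    (List.perm_ext_iff_of_nodup hnd hndf).mpr hmem
  exact PySem.List.sorted_eq_of_perm_of_pairwise_lt _ _ _ hperm hpw

-- ===== VERDICT (by name: the statement is the Claim_ definition above) =====
theorem forecast_required_series_spec : Claim_equal_forecast_required_series := by
  intro object_rows _
  unfold Spec_forecast_required_series forecast_required_series forecast_required_series_alt
  cases object_rows with
  | none => decide
  | some rows =>
    cases rows with
    | nil => decide
    | cons r rs =>
      simp only [Option.getD_some, if_neg (List.cons_ne_nil r rs)]
      rw [pvFoldA_eq, pvRun_eq_sorted]
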